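-- pv_equiv track=rewrite | github.com/abdualiaisultan0-byte/analysis_olistmarket | main.py | split_sql_with_labels
-- ===== SOURCE A (Python) =====
-- def split_sql_with_labels(text: str):
--     """
--     Делит файл по ';' и присваивает метку из комментария вида '-- Q6: ...'.
--     Возвращает список (label, sql).
--     """
--     blocks, buf, label = [], [], "QUERY"
--     for line in text.splitlines():
--         s = line.strip()
--         if s.startswith("-- Q"):
--
--             try:
--                 label = s.split()[1].rstrip(":")
--             except Exception:
--                 label = "QUERY"
--         buf.append(line)
--         if s.endswith(";"):
--             sql = "\n".join(buf).strip()
--             if any(not ln.strip().startswith("--") and ln.strip() for ln in buf):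
--                 blocks.append((label, sql))
--             buf, label = [], "QUERY"
--     return blocks
-- ===== SOURCE B (Python) =====
-- def split_sql_with_labels(text: str):
--     # Pass 1: group lines into ';'-terminated blocks (unterminated tail discarded).
--     blocks, cur = [], []
--     for line in text.splitlines():
--         cur.append(line)
--         if line.strip().endswith(";"):
--             blocks.append(cur)
--             cur = []
--     # Pass 2: label each block from its last '-- Q' comment, keep blocks with real SQL.
--     result = []
--     for blk in blocks:
--         label = "QUERY"
--         for line in reversed(blk):
--             s = line.strip()
--             if s.startswith("-- Q"):
--                 parts = s.split()
--                 label = parts[1].rstrip(":") if len(parts) > 1 else "QUERY"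
--                 break
--         sql = "\n".join(blk).strip()
--         if any(ln.strip() and not ln.strip().startswith("--") for ln in blk):
--             result.append((label, sql))
--     return result
-- ===== Notes on version B (the rewrite author's own statement) =====
-- stated objective: alternative
-- what changed: Replaces A's single interleaved loop carrying (blocks, buf, label) state with a two-pass group-then-map: first split the lines into semicolon-terminated blocks, then per block derive the label by scanning the block in reverse for the last label comment, and filter/emit.
import Mathlib
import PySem

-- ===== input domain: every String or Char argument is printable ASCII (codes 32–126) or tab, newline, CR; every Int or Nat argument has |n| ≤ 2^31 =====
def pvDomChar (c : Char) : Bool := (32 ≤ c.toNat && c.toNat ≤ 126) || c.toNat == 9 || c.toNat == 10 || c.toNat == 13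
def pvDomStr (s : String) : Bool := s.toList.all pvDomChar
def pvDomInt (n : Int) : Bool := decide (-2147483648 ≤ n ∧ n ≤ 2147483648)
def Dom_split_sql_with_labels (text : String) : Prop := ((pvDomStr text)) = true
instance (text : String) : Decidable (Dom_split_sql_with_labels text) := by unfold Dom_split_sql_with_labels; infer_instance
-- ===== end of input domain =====

-- B replaces A's single interleaved stateful loop with a two-pass group-then-map decomposition (alternative, same cost).


-- hand port of w.rstrip(":") — drop trailing ':' characters; exact for this single-char set
def rstripColon (w : String) : String := String.ofList ((w.toList.reverse.dropWhile (· == ':')).reverse)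

-- ===== PORT A =====
-- A's try/except label parse: s.split()[1].rstrip(":"), IndexError -> "QUERY"
def parseA (s : String) : String :=
  match PySem.List.pyGet? (PySem.Str.split₀ s) 1 with
  | some w => rstripColon w
  | none => "QUERY"

-- one fold over the lines carrying (blocks, buf, label), as in A
def splitStepA (st : List (String × String) × List String × String) (line : String) :
    List (String × String) × List String × String :=
  let s := PySem.Str.strip line
  let label :=
    if PySem.Str.startswith s "-- Q" then parseA s
    else st.2.2
  let buf := st.2.1 ++ [line]
  if PySem.Str.endswith s ";" then
    let sql := PySem.Str.strip (PySem.Str.join "\n" buf)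
    let blocks :=
      if buf.any (fun ln => !(PySem.Str.startswith (PySem.Str.strip ln) "--") && !(PySem.Str.strip ln == "")) then
        st.1 ++ [(label, sql)]
      else st.1
    (blocks, [], "QUERY")
  else
    (st.1, buf, label)

def split_sql_with_labels (text : String) : List (String × String) :=
  ((PySem.Str.splitlines text).foldl splitStepA ([], [], "QUERY")).1

-- ===== PORT B =====
-- pass 1: group lines into ';'-terminated blocks, discarding an unterminated tail
def groupBlocks : List String → List String → List (List String)
  | [], _ => []
  | l :: ls, cur =>
    if PySem.Str.endswith (PySem.Str.strip l) ";" then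
      (cur ++ [l]) :: groupBlocks ls []
    else
      groupBlocks ls (cur ++ [l])

-- B's label parse: parts[1].rstrip(":") when it exists, else "QUERY"
def parseB (s : String) : String :=
  match PySem.Str.split₀ s with
  | _ :: w :: _ => rstripColon w
  | _ => "QUERY"

-- pass 2 helper: first '-- Q' label found in the given (reversed-block) line list
def labelFirst : List String → String
  | [] => "QUERY"
  | l :: ls =>
    let s := PySem.Str.strip l
    if PySem.Str.startswith s "-- Q" then parseB s
    else labelFirst ls

def emitBlock (blk : List String) : Option (String × String) :=
  if blk.any (fun ln => !(PySem.Str.strip ln == "") && !(PySem.Str.startswith (PySem.Str.strip ln) "--")) then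
    some (labelFirst blk.reverse, PySem.Str.strip (PySem.Str.join "\n" blk))
  else none

def split_sql_with_labels_alt (text : String) : List (String × String) :=
  (groupBlocks (PySem.Str.splitlines text) []).filterMap emitBlock

-- ===== PRECONDITION & SPEC =====
def Spec_split_sql_with_labels (text : String) (out : List (String × String)) : Prop := out = split_sql_with_labels_alt text
instance (text : String) (out : List (String × String)) : Decidable (Spec_split_sql_with_labels text out) := by unfold Spec_split_sql_with_labels; infer_instance

-- ===== CLAIM (what is proved, stated in full; the proofs are below) =====
def Claim_equal_split_sql_with_labels : Prop := ∀ (text : String), Dom_split_sql_with_labels text → Spec_split_sql_with_labels text (split_sql_with_labels text)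

-- ===== LEMMAS AND PROOFS =====

-- A's incremental label parse (Python xs[1] via pyGet?) agrees with B's pattern-match parse
theorem parse_eq (s : String) : parseA s = parseB s := by
  unfold parseA parseB
  rcases h : PySem.Str.split₀ s with _ | ⟨a, _ | ⟨b, rest⟩⟩ <;>
    simp [PySem.List.pyGet?, PySem.List.pyIdx?]

theorem labelFirst_cons (l : String) (ls : List String) :
    labelFirst (l :: ls) =
      (if PySem.Str.startswith (PySem.Str.strip l) "-- Q" then parseA (PySem.Str.strip l)
      else labelFirst ls) := by
  rw [parse_eq]
  rfl

-- extending the buffer by one line updates labelFirst of the reversed buffer exactly as A updates its label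
theorem labelFirst_snoc (buf : List String) (line : String) :
    labelFirst ((buf ++ [line]).reverse) =
      (if PySem.Str.startswith (PySem.Str.strip line) "-- Q" then parseA (PySem.Str.strip line)
      else labelFirst buf.reverse) := by
  rw [List.reverse_append, List.reverse_singleton, List.singleton_append, labelFirst_cons]

-- the two keep-conditions are the same boolean
theorem any_eq (buf : List String) :
    (buf.any (fun ln => !(PySem.Str.startswith (PySem.Str.strip ln) "--") && !(PySem.Str.strip ln == ""))) =
    (buf.any (fun ln => !(PySem.Str.strip ln == "") && !(PySem.Str.startswith (PySem.Str.strip ln) "--"))) := by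
  have hf : (fun ln : String => !(PySem.Str.startswith (PySem.Str.strip ln) "--") && !(PySem.Str.strip ln == "")) =
      (fun ln : String => !(PySem.Str.strip ln == "") && !(PySem.Str.startswith (PySem.Str.strip ln) "--")) :=
    funext fun ln => Bool.and_comm _ _
  rw [hf]

theorem emitBlock_pos (blk : List String)
    (h : blk.any (fun ln => !(PySem.Str.strip ln == "") && !(PySem.Str.startswith (PySem.Str.strip ln) "--")) = true) :
    emitBlock blk = some (labelFirst blk.reverse, PySem.Str.strip (PySem.Str.join "\n" blk)) := by
  unfold emitBlock
  rw [if_pos h]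

theorem emitBlock_neg (blk : List String)
    (h : blk.any (fun ln => !(PySem.Str.strip ln == "") && !(PySem.Str.startswith (PySem.Str.strip ln) "--")) = false) :
    emitBlock blk = none := by
  unfold emitBlock
  rw [if_neg (by rw [h]; exact Bool.false_ne_true)]

-- main invariant: folding A's step from any state whose label is labelFirst of the reversed buffer
-- produces the already-emitted blocks followed by B's group-then-map of the remaining lines
theorem fold_invariant (lines : List String) :
    ∀ (blocks : List (String × String)) (buf : List String) (label : String),
      label = labelFirst buf.reverse →
      (lines.foldl splitStepA (blocks, buf, label)).1 =
        blocks ++ (groupBlocks lines buf).filterMap emitBlock := by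
  induction lines with
  | nil => intro blocks buf label _; simp [groupBlocks]
  | cons l ls ih =>
    intro blocks buf label hl
    subst hl
    simp only [List.foldl_cons, splitStepA]
    by_cases he : PySem.Str.endswith (PySem.Str.strip l) ";" = true
    · rw [if_pos he]
      by_cases hk : ((buf ++ [l]).any
          (fun ln => !(PySem.Str.startswith (PySem.Str.strip ln) "--") && !(PySem.Str.strip ln == ""))) = true
      · rw [if_pos hk, ih _ [] "QUERY" rfl]
        simp only [groupBlocks]
        rw [if_pos he, List.filterMap_cons,
            emitBlock_pos _ (by rw [← any_eq]; exact hk), ← labelFirst_snoc]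
        simp [List.append_assoc]
      · rw [if_neg hk, ih _ [] "QUERY" rfl]
        simp only [groupBlocks]
        rw [if_pos he, List.filterMap_cons,
            emitBlock_neg _ (by rw [← any_eq]; exact Bool.eq_false_iff.mpr hk)]
    · rw [if_neg he, ih blocks (buf ++ [l]) _ (labelFirst_snoc buf l).symm]
      simp only [groupBlocks]
      rw [if_neg he]

-- ===== VERDICT (by name: the statement is the Claim_ definition above) =====
theorem split_sql_with_labels_spec : Claim_equal_split_sql_with_labels := by
  intro text _
  unfold Spec_split_sql_with_labels split_sql_with_labels split_sql_with_labels_alt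
  have h := fold_invariant (PySem.Str.splitlines text) [] [] "QUERY" rfl
  simpa using h
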